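-- pv_equiv track=rewrite | github.com/soasme/techshack.weekly | sync.py | group_by_date
-- ===== SOURCE A (Python) =====
-- def group_by_date(rows):
--     prev = None
--     batch = []
--     for row in rows:
--         uuid, dt, ref, thoughts, tags = row
--         date = dt[0:10]
--
--         if prev is None:
--             prev = date
--
--         if prev != date:
--             yield batch
--             batch = [row]
--         else:
--             batch.append(row)
--         prev = date
--     if batch:
--         yield batch
-- ===== SOURCE B (Python) =====
-- def group_by_date(rows):
--     rows = list(rows)
--     n = len(rows)
--     i = 0
--     while i < n:
--         uuid, dt, ref, thoughts, tags = rows[i]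
--         k = dt[0:10]
--         j = i + 1
--         while j < n and rows[j][1][0:10] == k:
--             j += 1
--         yield rows[i:j]
--         i = j
-- ===== Notes on version B (the rewrite author's own statement) =====
-- stated objective: alternative
-- what changed: Replaced the prev/batch state-machine fold with index-based run scanning: find the end of each run of equal date keys with an inner scan and yield the slice, instead of carrying prev/batch accumulator state across a single fold.
import Mathlib
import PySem

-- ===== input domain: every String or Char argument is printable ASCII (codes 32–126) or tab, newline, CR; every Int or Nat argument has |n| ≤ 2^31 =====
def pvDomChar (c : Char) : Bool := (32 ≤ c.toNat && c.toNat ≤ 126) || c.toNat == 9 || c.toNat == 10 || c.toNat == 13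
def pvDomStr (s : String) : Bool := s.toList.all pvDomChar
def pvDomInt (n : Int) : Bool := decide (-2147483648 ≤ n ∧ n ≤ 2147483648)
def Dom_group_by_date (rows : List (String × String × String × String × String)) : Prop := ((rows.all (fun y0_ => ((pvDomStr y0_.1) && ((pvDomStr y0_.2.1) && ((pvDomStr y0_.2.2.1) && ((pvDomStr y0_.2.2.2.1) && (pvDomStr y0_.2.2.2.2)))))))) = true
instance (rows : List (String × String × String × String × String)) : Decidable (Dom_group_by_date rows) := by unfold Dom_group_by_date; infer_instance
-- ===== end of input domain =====

-- B replaces A's prev/batch state-machine fold with index-free run scanning (take/drop the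
-- current run of equal date keys); equal return values, same cost ("alternative").
-- Both Pythons are generators; only the yielded sequence (the return value) is compared.

-- dt[0:10], the date key of a row (used by both sources)
def pvKey (row : String × String × String × String × String) : String :=
  PySem.Str.slice row.2.1 (some 0) (some 10)

-- ===== PORT A =====
-- one iteration of A's for-loop: state = (prev, batch, yielded so far)
def pvStepA (s : Option String × List (String × String × String × String × String) ×
    List (List (String × String × String × String × String)))
    (row : String × String × String × String × String) :
    Option String × List (String × String × String × String × String) ×
    List (List (String × String × String × String × String)) :=
  let date := pvKey row
  let prev := if s.1 = none then some date else s.1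
  if prev ≠ some date then (some date, [row], s.2.2 ++ [s.2.1])
  else (some date, s.2.1 ++ [row], s.2.2)

-- the trailing 'if batch: yield batch'
def pvFinishA (s : Option String × List (String × String × String × String × String) ×
    List (List (String × String × String × String × String))) :
    List (List (String × String × String × String × String)) :=
  if s.2.1 ≠ [] then s.2.2 ++ [s.2.1] else s.2.2

def group_by_date (rows : List (String × String × String × String × String)) :
    List (List (String × String × String × String × String)) :=
  pvFinishA (rows.foldl pvStepA (none, [], []))

-- ===== PORT B =====
-- Source B: scan forward to the end of the current run of equal keys, yield that run, continue
def pvRuns : List (String × String × String × String × String) →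
    List (List (String × String × String × String × String))
  | [] => []
  | r :: rs =>
      let k := pvKey r
      (r :: rs.takeWhile (fun x => pvKey x == k)) ::
        pvRuns (rs.dropWhile (fun x => pvKey x == k))
termination_by l => l.length
decreasing_by
  simp only [List.length_cons]
  exact Nat.lt_succ_of_le (List.length_dropWhile_le _ _)

def group_by_date_alt (rows : List (String × String × String × String × String)) :
    List (List (String × String × String × String × String)) :=
  pvRuns rows

-- ===== PRECONDITION & SPEC =====
def Spec_group_by_date (rows : List (String × String × String × String × String)) (out : List (List (String × String × String × String × String))) : Prop := out = group_by_date_alt rows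
instance (rows : List (String × String × String × String × String)) (out : List (List (String × String × String × String × String))) : Decidable (Spec_group_by_date rows out) := by unfold Spec_group_by_date; infer_instance

-- ===== CLAIM (what is proved, stated in full; the proofs are below) =====
def Claim_equal_group_by_date : Prop := ∀ (rows : List (String × String × String × String × String)), Dom_group_by_date rows → Spec_group_by_date rows (group_by_date rows)

-- ===== LEMMAS AND PROOFS =====

theorem pvRuns_nil : pvRuns [] = [] := by rw [pvRuns.eq_def]

theorem pvRuns_cons (r : String × String × String × String × String)
    (rs : List (String × String × String × String × String)) :
    pvRuns (r :: rs) =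
      (r :: rs.takeWhile (fun x => pvKey x == pvKey r)) ::
        pvRuns (rs.dropWhile (fun x => pvKey x == pvKey r)) := by
  rw [pvRuns.eq_def]

-- invariant of A's fold once the first row has been seen: prev is the key of every row in
-- the (nonempty) current batch, and finishing the fold appends the pending runs.
theorem pvFold_eq_runs (rs : List (String × String × String × String × String))
    (k : String) (batch : List (String × String × String × String × String))
    (out : List (List (String × String × String × String × String)))
    (hb : batch ≠ []) :
    pvFinishA (rs.foldl pvStepA (some k, batch, out)) =
      out ++ (batch ++ rs.takeWhile (fun x => pvKey x == k)) ::
        pvRuns (rs.dropWhile (fun x => pvKey x == k)) := by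
  induction rs generalizing k batch out with
  | nil => simp [pvFinishA, hb, pvRuns_nil]
  | cons r rs ih =>
      by_cases h : pvKey r = k
      · have hstep : pvStepA (some k, batch, out) r = (some k, batch ++ [r], out) := by
          simp [pvStepA, h]
        simp only [List.foldl_cons, hstep, List.takeWhile_cons, List.dropWhile_cons, h,
          beq_self_eq_true, if_true]
        rw [ih k (batch ++ [r]) out (by simp)]
        simp
      · have hstep : pvStepA (some k, batch, out) r =
            (some (pvKey r), [r], out ++ [batch]) := by
          simp [pvStepA, Ne.symm h]
        have hk : (pvKey r == k) = false := by simp [h]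
        simp only [List.foldl_cons, hstep, List.takeWhile_cons, List.dropWhile_cons, hk]
        rw [ih (pvKey r) [r] (out ++ [batch]) (by simp)]
        simp [pvRuns_cons]

-- ===== VERDICT (by name: the statement is the Claim_ definition above) =====
theorem group_by_date_spec : Claim_equal_group_by_date := by
  intro rows _
  unfold Spec_group_by_date group_by_date group_by_date_alt
  cases rows with
  | nil => simp [pvFinishA, pvRuns_nil]
  | cons r rs =>
      have hstep : pvStepA (none, [], []) r = (some (pvKey r), [r], []) := by
        simp [pvStepA]
      simp only [List.foldl_cons, hstep]
      rw [pvFold_eq_runs rs (pvKey r) [r] [] (by simp), pvRuns_cons]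
      simp
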